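-- pv_equiv track=rewrite | github.com/pypi-data/pypi-mirror-398 | packages/kele/kele-0.0.0.dev0.tar.gz/kele-0.0.0.dev0/al_inference_engine/syntax/base_classes.py | _union_find_build
-- ===== SOURCE A (Python) =====
-- def _union_find_build(links: list[tuple[str, str]]) -> dict[str, str]:
--     """Build a union-find parent map from equality constraints of the form (a, b)."""
--     parent: dict[str, str] = {}
--
--     def find(x: str) -> str:
--         parent.setdefault(x, x)
--         if parent[x] != x:
--             parent[x] = find(parent[x])
--         return parent[x]
--
--     def union(a: str, b: str) -> None:
--         ra, rb = find(a), find(b)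
--         if ra != rb:
--             parent[rb] = ra
--
--     for a, b in links:
--         union(a, b)
--
--     # Path compression.
--     for k in list(parent.keys()):
--         parent[k] = find(k)
--     return parent
-- ===== SOURCE B (Python) =====
-- def _union_find_build(links: list[tuple[str, str]]) -> dict[str, str]:
--     """Build a union-find parent map from equality constraints of the form (a, b)."""
--     # Eager component relabelling: rep[x] is always the final representative of x,
--     # so no parent chains, no find(), and no normalisation pass are needed.
--     rep: dict[str, str] = {}
--     for a, b in links:
--         rep.setdefault(a, a)
--         rep.setdefault(b, b)
--         ra, rb = rep[a], rep[b]
--         if ra != rb: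
--             for x in rep:
--                 if rep[x] == rb:
--                     rep[x] = ra
--     return rep
-- ===== Notes on version B (the rewrite author's own statement) =====
-- stated objective: simpler
-- what changed: A builds parent chains with a recursive path-compressing find plus a final normalisation pass; B keeps no chains at all: it stores each node's representative directly and, on a union, relabels every member of the losing component in one scan, so find() and the final pass disappear.
import Mathlib
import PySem

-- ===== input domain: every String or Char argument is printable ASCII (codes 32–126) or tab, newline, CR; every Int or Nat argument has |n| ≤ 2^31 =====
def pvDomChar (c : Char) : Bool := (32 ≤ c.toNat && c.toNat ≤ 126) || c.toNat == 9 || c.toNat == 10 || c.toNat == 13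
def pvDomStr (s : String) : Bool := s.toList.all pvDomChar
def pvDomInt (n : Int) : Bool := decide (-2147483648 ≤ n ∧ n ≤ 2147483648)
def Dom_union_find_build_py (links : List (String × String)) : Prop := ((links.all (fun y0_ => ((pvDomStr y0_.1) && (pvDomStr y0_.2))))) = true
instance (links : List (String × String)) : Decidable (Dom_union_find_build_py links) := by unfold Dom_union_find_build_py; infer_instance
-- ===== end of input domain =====

-- B replaces A's recursive find/union with path compression by eager component
-- relabelling (every node always maps directly to its representative); objective:
-- simpler — no find(), no parent chains, no final normalisation pass.

-- ===== PORT A =====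
-- A's recursive `find` (setdefault, then recurse on parent[x] with path compression).
-- Python's recursion terminates because parent chains are acyclic; the fuel
-- parameter (2*|links|+1 at every call site, an upper bound on any chain length)
-- only makes the same computation total and is never exhausted.
def pvFindA : Nat → PySem.Dict String String → String → PySem.Dict String String × String
  | 0, p, x =>
      let p := p.setdefault x x
      (p, p.getD x x)
  | fuel+1, p, x =>
      let p := p.setdefault x x
      if p.getD x x ≠ x then
        let fr := pvFindA fuel p (p.getD x x)
        let p := fr.1.insert x fr.2
        (p, p.getD x x)
      else
        (p, p.getD x x)

-- A's `union`: ra, rb = find(a), find(b); if ra != rb: parent[rb] = ra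
def pvUnionA (fuel : Nat) (p : PySem.Dict String String) (a b : String) : PySem.Dict String String :=
  let fa := pvFindA fuel p a
  let fb := pvFindA fuel fa.1 b
  if fa.2 ≠ fb.2 then fb.1.insert fb.2 fa.2 else fb.1

def union_find_build_py (links : List (String × String)) : List (String × String) :=
  let fuel := 2 * links.length + 1
  let p := links.foldl (fun p ab => pvUnionA fuel p ab.1 ab.2) PySem.Dict.empty
  let p := p.keys.foldl (fun p k =>
      let fr := pvFindA fuel p k
      fr.1.insert k fr.2) p
  p.items

-- ===== PORT B =====
-- B's inner loop: for x in rep: if rep[x] == rb: rep[x] = ra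
def pvRelabelB (rep : PySem.Dict String String) (ra rb : String) : PySem.Dict String String :=
  rep.keys.foldl (fun rep x => if rep.getD x x = rb then rep.insert x ra else rep) rep

-- B's body for one link (a, b)
def pvStepB (rep : PySem.Dict String String) (a b : String) : PySem.Dict String String :=
  let rep := rep.setdefault a a
  let rep := rep.setdefault b b
  let ra := rep.getD a a
  let rb := rep.getD b b
  if ra ≠ rb then pvRelabelB rep ra rb else rep

def union_find_build_py_alt (links : List (String × String)) : List (String × String) :=
  (links.foldl (fun rep ab => pvStepB rep ab.1 ab.2) PySem.Dict.empty).items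

-- ===== PRECONDITION & SPEC =====
def Spec_union_find_build_py (links : List (String × String)) (out : List (String × String)) : Prop := out = union_find_build_py_alt links
instance (links : List (String × String)) (out : List (String × String)) : Decidable (Spec_union_find_build_py links out) := by unfold Spec_union_find_build_py; infer_instance

-- ===== CLAIM (what is proved, stated in full; the proofs are below) =====
def Claim_equal_union_find_build_py : Prop := ∀ (links : List (String × String)), Dom_union_find_build_py links → Spec_union_find_build_py links (union_find_build_py links)

-- ===== LEMMAS AND PROOFS =====

-- A parent chain from x to its root r: consecutive parent steps, ending at a fixpoint.
inductive pvChain (p : PySem.Dict String String) : String → List String → String → Prop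
  | root (x : String) : p.getD x x = x → pvChain p x [x] x
  | step (x y r : String) (c : List String) :
      p.getD x x = y → x ≠ y → pvChain p y c r → pvChain p x (x :: c) r

-- x has root r via a duplicate-free chain inside p's key set
def pvRooted (p : PySem.Dict String String) (x r : String) : Prop :=
  ∃ c, pvChain p x c r ∧ c.Nodup ∧ ∀ z ∈ c, z ∈ p.keys

-- p' only redirects some nodes (whose root is rc) straight to rc; keys unchanged.
def pvCompress (p p' : PySem.Dict String String) (rc : String) : Prop :=
  p'.keys = p.keys ∧ ∀ y, p'.getD y y = p.getD y y ∨ (p'.getD y y = rc ∧ pvRooted p y rc)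

-- The simulation invariant between A's parent dict and B's rep dict.
def pvInv (p rep : PySem.Dict String String) : Prop :=
  p.keys = rep.keys ∧ rep.keys.Nodup ∧
  (∀ x ∈ rep.keys, pvRooted p x (rep.getD x x)) ∧
  (∀ x ∈ rep.keys, rep.getD x x ∈ rep.keys ∧
    rep.getD (rep.getD x x) (rep.getD x x) = rep.getD x x)

theorem pvChain_head_mem {p : PySem.Dict String String} {x : String} {c : List String} {r : String}
    (h : pvChain p x c r) : x ∈ c := by
  cases h <;> simp

theorem pvChain_root_mem {p : PySem.Dict String String} {x : String} {c : List String} {r : String}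
    (h : pvChain p x c r) : r ∈ c := by
  induction h with
  | root x hx => simp
  | step x y r c hxy hne htail ih => exact List.mem_cons_of_mem _ ih

theorem pvChain_root_fix {p : PySem.Dict String String} {x : String} {c : List String} {r : String}
    (h : pvChain p x c r) : p.getD r r = r := by
  induction h with
  | root x hx => exact hx
  | step x y r c hxy hne htail ih => exact ih

theorem pvChain_det {p : PySem.Dict String String} {x : String} {c c' : List String} {r r' : String}
    (h : pvChain p x c r) (h' : pvChain p x c' r') : r = r' := by
  induction h generalizing c' r' with
  | root x hx =>
    cases h' with
    | root _ _ => rfl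
    | step _ y _ _ hxy hne _ => exact absurd (hx.symm.trans hxy) hne
  | step x y r c hxy hne htail ih =>
    cases h' with
    | root _ hx => exact absurd (hx.symm.trans hxy) hne
    | step _ y' _ c'' hxy' hne' htail' =>
      exact ih (by rwa [show y = y' from hxy ▸ hxy'] )

theorem pvRooted_det {p : PySem.Dict String String} {x r r' : String}
    (h : pvRooted p x r) (h' : pvRooted p x r') : r = r' := by
  obtain ⟨c, hc, -, -⟩ := h
  obtain ⟨c', hc', -, -⟩ := h'
  exact pvChain_det hc hc' 

theorem pvChain_fix_root {p : PySem.Dict String String} {x : String} {c : List String} {r : String}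
    (h : pvChain p x c r) (hfix : p.getD x x = x) : r = x := by
  cases h with
  | root _ _ => rfl
  | step _ y _ _ hxy hne _ => exact absurd (hfix.symm.trans hxy) hne

theorem pvRooted_fix {p : PySem.Dict String String} {x r : String} (h : pvRooted p x r) :
    p.getD r r = r := by
  obtain ⟨c, hc, -, -⟩ := h
  exact pvChain_root_fix hc

-- root of a root is itself
theorem pvRooted_self {p : PySem.Dict String String} {x r : String}
    (h : pvRooted p x r) (hfix : p.getD x x = x) : r = x := by
  obtain ⟨c, hc, -, -⟩ := h
  exact pvChain_fix_root hc hfix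

-- chains survive a compression step (with a chain that is a sub-collection of the old one)
theorem pvChain_compress {p p' : PySem.Dict String String} {rc y s : String} {c : List String}
    (hc : pvCompress p p' rc) (h : pvChain p y c s) (hnd : c.Nodup)
    (hmem : ∀ z ∈ c, z ∈ p.keys) :
    ∃ c', pvChain p' y c' s ∧ c'.Nodup ∧ c' ⊆ c := by
  induction h with
  | root x hx =>
    refine ⟨[x], ?_, List.nodup_singleton x, List.Subset.refl _⟩
    rcases hc.2 x with hleft | ⟨hval, hrt⟩
    · exact pvChain.root x (hleft.trans hx)
    · exact pvChain.root x (hval.trans (pvRooted_self hrt hx))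
  | step x y r c hxy hne htail ih =>
    rcases hc.2 x with hleft | ⟨hval, hrt⟩
    · obtain ⟨c', hc', hnd', hsub'⟩ :=
        ih (List.nodup_cons.mp hnd).2 (fun z hz => hmem z (List.mem_cons_of_mem _ hz))
      refine ⟨x :: c', pvChain.step x y r c' (hleft.trans hxy) hne hc', ?_, ?_⟩
      · exact List.nodup_cons.mpr ⟨fun hx => (List.nodup_cons.mp hnd).1 (hsub' hx), hnd'⟩
      · exact List.cons_subset_cons x hsub'
    · have hfull : pvRooted p x r := ⟨x :: c, pvChain.step x y r c hxy hne htail, hnd, hmem⟩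
      have hrc : rc = r := pvRooted_det hrt hfull
      have hval' : p'.getD x x = r := hrc ▸ hval
      have hrootfix : p'.getD r r = r := by
        rcases hc.2 r with hleft | ⟨hv, hr⟩
        · exact hleft.trans (pvChain_root_fix htail)
        · exact hv.trans (pvRooted_self hr (pvChain_root_fix htail))
      by_cases hxr : x = r
      · exact ⟨[x], hxr ▸ pvChain.root x (hval'.trans hxr.symm), List.nodup_singleton x,
          by simp⟩
      · refine ⟨[x, r], pvChain.step x r r [r] hval' hxr (pvChain.root r hrootfix), ?_, ?_⟩
        · simp [hxr]
        · intro z hz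
          rcases List.mem_pair.mp hz with rfl | rfl
          · exact List.mem_cons_self
          · exact List.mem_cons_of_mem _ (pvChain_root_mem htail)

theorem pvRooted_compress {p p' : PySem.Dict String String} {rc y s : String}
    (hc : pvCompress p p' rc) (h : pvRooted p y s) : pvRooted p' y s := by
  obtain ⟨c, hch, hnd, hmem⟩ := h
  obtain ⟨c', hch', hnd', hsub'⟩ := pvChain_compress hc hch hnd hmem
  exact ⟨c', hch', hnd', fun z hz => hc.1 ▸ hmem z (hsub' hz)⟩

theorem pvInv_compress {p p' rep : PySem.Dict String String} {rc : String}
    (hc : pvCompress p p' rc) (hinv : pvInv p rep) : pvInv p' rep := by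
  obtain ⟨hk, hnd, hroot, hrep⟩ := hinv
  exact ⟨hc.1.trans hk, hnd, fun x hx => pvRooted_compress hc (hroot x hx), hrep⟩

-- find on a key absent from the dict just installs it as its own root
theorem pvFindA_fresh (n : Nat) (p : PySem.Dict String String) (x : String)
    (h : p.contains x = false) : pvFindA n p x = (p.insert x x, x) := by
  cases n with
  | zero =>
    simp [pvFindA, PySem.Dict.setdefault_of_not_contains p x h, PySem.Dict.getD_insert_self]
  | succ m =>
    simp [pvFindA, PySem.Dict.setdefault_of_not_contains p x h, PySem.Dict.getD_insert_self]

-- find on a rooted key returns the root and performs a compression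
theorem pvFindA_spec (n : Nat) (p : PySem.Dict String String) (x r : String) (c : List String)
    (h : pvChain p x c r) (hnd : c.Nodup) (hmem : ∀ z ∈ c, z ∈ p.keys) (hlen : c.length ≤ n) :
    (pvFindA n p x).2 = r ∧ pvCompress p (pvFindA n p x).1 r := by
  induction n generalizing p x c r with
  | zero =>
    have h1 : 1 ≤ c.length := List.length_pos_of_mem (pvChain_head_mem h)
    omega
  | succ m ih =>
    have hxk : x ∈ p.keys := hmem x (pvChain_head_mem h)
    have hcont : p.contains x = true := (PySem.Dict.contains_iff_mem_keys _ _).mpr hxk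
    cases h with
    | root _ hx =>
      have heq : pvFindA (m+1) p x = (p, x) := by
        simp [pvFindA, PySem.Dict.setdefault_of_contains p x hcont, hx]
      rw [heq]
      exact ⟨rfl, rfl, fun y => Or.inl rfl⟩
    | step _ y _ c₂ hxy hne htail =>
      obtain ⟨ihv, ihk, ihc⟩ := ih p y r c₂ htail (List.nodup_cons.mp hnd).2
        (fun z hz => hmem z (List.mem_cons_of_mem _ hz))
        (by simpa using Nat.le_of_succ_le_succ (by simpa using hlen))
      have heq : pvFindA (m+1) p x = ((pvFindA m p y).1.insert x r, r) := by
        simp only [pvFindA, PySem.Dict.setdefault_of_contains p x hcont, hxy, ihv,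
          PySem.Dict.getD_insert_self]
        rw [if_pos (Ne.symm hne)]
      rw [heq]
      have hxk2 : x ∈ (pvFindA m p y).1.keys := ihk ▸ hxk
      refine ⟨rfl, ?_, ?_⟩
      · rw [PySem.Dict.keys_insert_of_contains _ _
          ((PySem.Dict.contains_iff_mem_keys _ _).mpr hxk2)]
        exact ihk
      · intro z
        by_cases hzx : z = x
        · subst hzx
          exact Or.inr ⟨PySem.Dict.getD_insert_self _ _ _ _,
            ⟨z :: c₂, pvChain.step z y r c₂ hxy hne htail, hnd, hmem⟩⟩
        · rw [PySem.Dict.getD_insert_of_ne _ _ _ hzx]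
          exact ihc z

-- chains are untouched by inserting a fresh key
theorem pvChain_insert_fresh {p : PySem.Dict String String} {a y s : String} {c : List String}
    (ha : a ∉ p.keys) (h : pvChain p y c s) (hmem : ∀ z ∈ c, z ∈ p.keys) :
    pvChain (p.insert a a) y c s := by
  induction h with
  | root x hx =>
    have hxa : x ≠ a := fun he => ha (he ▸ hmem x (by simp))
    exact pvChain.root x ((PySem.Dict.getD_insert_of_ne _ _ _ hxa).trans hx)
  | step x y r c hxy hne htail ih =>
    have hxa : x ≠ a := fun he => ha (he ▸ hmem x (by simp))
    exact pvChain.step x y r c ((PySem.Dict.getD_insert_of_ne _ _ _ hxa).trans hxy) hne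
      (ih (fun z hz => hmem z (List.mem_cons_of_mem _ hz)))

-- chains whose root is not rb are untouched by parent[rb] = ra
theorem pvChain_insert_other {p : PySem.Dict String String} {rb ra y s : String} {c : List String}
    (hrb : p.getD rb rb = rb) (hne : s ≠ rb) (h : pvChain p y c s) :
    pvChain (p.insert rb ra) y c s := by
  induction h with
  | root x hx =>
    exact pvChain.root x ((PySem.Dict.getD_insert_of_ne _ _ _ hne).trans hx)
  | step x y r c hxy hxy' htail ih =>
    have hxrb : x ≠ rb := by
      rintro rfl
      exact hxy' (hxy.symm.trans hrb).symm
    exact pvChain.step x y r c ((PySem.Dict.getD_insert_of_ne _ _ _ hxrb).trans hxy) hxy' (ih hne)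

-- a chain ending at rb extends through parent[rb] = ra to end at ra
theorem pvChain_insert_extend {p : PySem.Dict String String} {rb ra y : String} {c : List String}
    (hrb : p.getD rb rb = rb) (hra : p.getD ra ra = ra) (hne : ra ≠ rb)
    (h : pvChain p y c rb) (hnd : c.Nodup) :
    pvChain (p.insert rb ra) y (c ++ [ra]) ra ∧ (c ++ [ra]).Nodup := by
  induction h with
  | root x hx =>
    refine ⟨?_, by simp [Ne.symm hne]⟩
    refine pvChain.step x ra ra [ra] (PySem.Dict.getD_insert_self _ _ _ _) (Ne.symm hne) ?_
    exact pvChain.root ra ((PySem.Dict.getD_insert_of_ne _ _ _ hne).trans hra)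
  | step x y r c hxy hxy' htail ih =>
    obtain ⟨ihc, ihn⟩ := ih hrb hne (List.nodup_cons.mp hnd).2
    have hxrb : x ≠ r := fun he => hxy' (he.trans (hxy.symm.trans (he ▸ hrb)).symm)
    have hxra : x ≠ ra := by
      rintro rfl
      exact hne (pvChain_fix_root (pvChain.step x y r c hxy hxy' htail) hra).symm
    refine ⟨pvChain.step x y ra (c ++ [ra])
      ((PySem.Dict.getD_insert_of_ne _ _ _ hxrb).trans hxy) hxy' ihc, ?_⟩
    refine List.nodup_cons.mpr ⟨?_, ihn⟩
    intro hx
    rcases List.mem_append.mp hx with hx' | hx'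
    · exact (List.nodup_cons.mp hnd).1 hx'
    · exact hxra (List.mem_singleton.mp hx')

theorem pvRelabelB_getD (ra rb : String) (l : List String) (d : PySem.Dict String String)
    (hnd : l.Nodup) (x : String) :
    (l.foldl (fun d x => if d.getD x x = rb then d.insert x ra else d) d).getD x x =
      if x ∈ l ∧ d.getD x x = rb then ra else d.getD x x := by
  induction l generalizing d with
  | nil => simp
  | cons y t ih =>
    have hnd2 := (List.nodup_cons.mp hnd).2
    have hyt := (List.nodup_cons.mp hnd).1
    simp only [List.foldl_cons]
    by_cases hyv : d.getD y y = rb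
    · rw [if_pos hyv, ih _ hnd2]
      by_cases hxy : x = y
      · subst hxy
        simp [hyt, hyv, PySem.Dict.getD_insert_self]
      · rw [PySem.Dict.getD_insert_of_ne _ _ _ hxy]
        simp [List.mem_cons, hxy]
    · rw [if_neg hyv, ih _ hnd2]
      by_cases hxy : x = y
      · subst hxy
        simp [hyv, hyt]
      · simp [List.mem_cons, hxy]

theorem pvRelabelB_keys (ra rb : String) (l : List String) (d : PySem.Dict String String)
    (hl : ∀ y ∈ l, y ∈ d.keys) :
    (l.foldl (fun d x => if d.getD x x = rb then d.insert x ra else d) d).keys = d.keys := by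
  induction l generalizing d with
  | nil => rfl
  | cons y t ih =>
    simp only [List.foldl_cons]
    by_cases hyv : d.getD y y = rb
    · rw [if_pos hyv]
      have hk : (d.insert y ra).keys = d.keys :=
        PySem.Dict.keys_insert_of_contains _ _
          ((PySem.Dict.contains_iff_mem_keys _ _).mpr (hl y List.mem_cons_self))
      rw [ih _ (fun z hz => hk ▸ hl z (List.mem_cons_of_mem _ hz)), hk]
    · rw [if_neg hyv]
      exact ih _ (fun z hz => hl z (List.mem_cons_of_mem _ hz))

theorem pvLen_le {l1 l2 : List String} (h : l1.Nodup) (hs : l1 ⊆ l2) :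
    l1.length ≤ l2.length := by
  have h1 : l1.toFinset.card = l1.length := List.toFinset_card_of_nodup h
  have h2 : l1.toFinset ⊆ l2.toFinset := by
    intro x hx
    simp only [List.mem_toFinset] at hx ⊢
    exact hs hx
  calc l1.length = l1.toFinset.card := h1.symm
    _ ≤ l2.toFinset.card := Finset.card_le_card h2
    _ ≤ l2.length := l2.toFinset_card_le

-- one find phase of A next to one setdefault phase of B
theorem pvPhase_find (fuel : Nat) (p rep : PySem.Dict String String) (x : String)
    (hinv : pvInv p rep) (hfuel : rep.keys.length < fuel) :
    pvInv (pvFindA fuel p x).1 (rep.setdefault x x) ∧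
    (pvFindA fuel p x).2 = (rep.setdefault x x).getD x x ∧
    (rep.setdefault x x).keys.length ≤ rep.keys.length + 1 := by
  obtain ⟨hk, hnd, hroot, hrep⟩ := hinv
  by_cases hx : x ∈ rep.keys
  · have hcont : rep.contains x = true := (PySem.Dict.contains_iff_mem_keys _ _).mpr hx
    rw [PySem.Dict.setdefault_of_contains rep x hcont]
    obtain ⟨c, hc, hcnd, hcmem⟩ := hroot x hx
    have hclen : c.length ≤ fuel := by
      have h1 : c.length ≤ p.keys.length :=
        pvLen_le hcnd (fun z hz => hcmem z hz)
      rw [hk] at h1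
      omega
    obtain ⟨hv, hcomp⟩ := pvFindA_spec fuel p x _ c hc hcnd hcmem hclen
    refine ⟨pvInv_compress hcomp ⟨hk, hnd, hroot, hrep⟩, ?_, by omega⟩
    exact hv
  · have hxp : x ∉ p.keys := hk ▸ hx
    have hcontp : p.contains x = false := by
      rcases hcp : p.contains x with _ | _
      · rfl
      · exact absurd ((PySem.Dict.contains_iff_mem_keys _ _).mp hcp) hxp
    have hcontr : rep.contains x = false := by
      rcases hcr : rep.contains x with _ | _
      · rfl
      · exact absurd ((PySem.Dict.contains_iff_mem_keys _ _).mp hcr) hx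
    rw [PySem.Dict.setdefault_of_not_contains rep x hcontr, pvFindA_fresh fuel p x hcontp]
    have hpk : (p.insert x x).keys = p.keys ++ [x] :=
      PySem.Dict.keys_insert_of_not_contains p x hcontp
    have hrk : (rep.insert x x).keys = rep.keys ++ [x] :=
      PySem.Dict.keys_insert_of_not_contains rep x hcontr
    have hgd : ∀ z, z ≠ x → (rep.insert x x).getD z z = rep.getD z z :=
      fun z hz => PySem.Dict.getD_insert_of_ne _ _ _ hz
    refine ⟨⟨by rw [hpk, hrk, hk], ?_, ?_, ?_⟩, ?_, ?_⟩
    · rw [hrk]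
      simp only [List.nodup_append, List.nodup_singleton]
      refine ⟨hnd, trivial, fun a ha b hb => ?_⟩
      rcases List.mem_singleton.mp hb with rfl
      exact fun he => hx (he ▸ ha)
    · intro z hz
      rw [hrk] at hz
      rcases List.mem_append.mp hz with hz' | hz'
      · have hzx : z ≠ x := fun he => hx (he ▸ hz')
        rw [hgd z hzx]
        obtain ⟨c, hc, hcnd, hcmem⟩ := hroot z hz'
        exact ⟨c, pvChain_insert_fresh hxp hc hcmem, hcnd,
          fun w hw => by rw [hpk]; exact List.mem_append_left _ (hcmem w hw)⟩
      · rcases List.mem_singleton.mp hz' with rfl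
        rw [PySem.Dict.getD_insert_self]
        exact ⟨[z], pvChain.root z (PySem.Dict.getD_insert_self _ _ _ _),
          List.nodup_singleton z, fun w hw => by
            rcases List.mem_singleton.mp hw with rfl
            rw [hpk]; exact List.mem_append_right _ (by simp)⟩
    · intro z hz
      rw [hrk] at hz
      rcases List.mem_append.mp hz with hz' | hz'
      · have hzx : z ≠ x := fun he => hx (he ▸ hz')
        rw [hgd z hzx]
        obtain ⟨hm, hi⟩ := hrep z hz'
        have hmx : rep.getD z z ≠ x := fun he => hx (he ▸ hm)
        rw [hgd _ hmx]
        exact ⟨by rw [hrk]; exact List.mem_append_left _ hm, hi⟩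
      · rcases List.mem_singleton.mp hz' with rfl
        rw [PySem.Dict.getD_insert_self]
        exact ⟨by rw [hrk]; exact List.mem_append_right _ (by simp),
          by rw [PySem.Dict.getD_insert_self]⟩
    · rw [PySem.Dict.getD_insert_self]
    · rw [hrk]
      simp

-- one link of A next to one link of B
theorem pvInv_link (fuel : Nat) (p rep : PySem.Dict String String) (a b : String)
    (hinv : pvInv p rep) (hfuel : rep.keys.length + 2 ≤ fuel) :
    pvInv (pvUnionA fuel p a b) (pvStepB rep a b) ∧
    (pvStepB rep a b).keys.length ≤ rep.keys.length + 2 := by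
  obtain ⟨hinv1, hv1, hlen1⟩ := pvPhase_find fuel p rep a hinv (by omega)
  obtain ⟨hinv2, hv2, hlen2⟩ :=
    pvPhase_find fuel (pvFindA fuel p a).1 (rep.setdefault a a) b hinv1 (by omega)
  have hamem1 : a ∈ (rep.setdefault a a).keys := by
    rw [PySem.Dict.keys_setdefault]
    split
    · exact (PySem.Dict.contains_iff_mem_keys _ _).mp (by assumption)
    · exact List.mem_append_right _ (by simp)
  have hra2 : ((rep.setdefault a a).setdefault b b).getD a a = (rep.setdefault a a).getD a a := by
    by_cases hab : a = b
    · subst hab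
      rw [PySem.Dict.setdefault_of_contains _ a
        ((PySem.Dict.contains_iff_mem_keys _ _).mpr hamem1)]
    · rw [PySem.Dict.getD_eq_get?_getD, PySem.Dict.get?_setdefault_of_ne _ _ hab,
        ← PySem.Dict.getD_eq_get?_getD]
  have hUA : pvUnionA fuel p a b =
      (if (pvFindA fuel p a).2 ≠ (pvFindA fuel (pvFindA fuel p a).1 b).2 then
        (pvFindA fuel (pvFindA fuel p a).1 b).1.insert
          (pvFindA fuel (pvFindA fuel p a).1 b).2 (pvFindA fuel p a).2
      else (pvFindA fuel (pvFindA fuel p a).1 b).1) := rfl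
  have hSB : pvStepB rep a b =
      (if ((rep.setdefault a a).setdefault b b).getD a a ≠
          ((rep.setdefault a a).setdefault b b).getD b b then
        pvRelabelB ((rep.setdefault a a).setdefault b b)
          (((rep.setdefault a a).setdefault b b).getD a a)
          (((rep.setdefault a a).setdefault b b).getD b b)
      else ((rep.setdefault a a).setdefault b b)) := rfl
  obtain ⟨hk2, hnd2, hroot2, hrep2i⟩ := hinv2
  have hamem2 : a ∈ ((rep.setdefault a a).setdefault b b).keys := by
    rw [PySem.Dict.keys_setdefault]
    split
    · exact hamem1
    · exact List.mem_append_left _ hamem1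
  have hbmem2 : b ∈ ((rep.setdefault a a).setdefault b b).keys := by
    rw [PySem.Dict.keys_setdefault]
    split
    · exact (PySem.Dict.contains_iff_mem_keys _ _).mp (by assumption)
    · exact List.mem_append_right _ (by simp)
  rw [hUA, hSB, hv1, ← hra2, hv2]
  by_cases hcond : ((rep.setdefault a a).setdefault b b).getD a a =
      ((rep.setdefault a a).setdefault b b).getD b b
  · rw [if_neg (by simpa using hcond), if_neg (by simpa using hcond)]
    exact ⟨⟨hk2, hnd2, hroot2, hrep2i⟩, by omega⟩
  · rw [if_pos hcond, if_pos hcond]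
    -- abbreviations inside this branch
    generalize hR2 : (rep.setdefault a a).setdefault b b = rep2 at *
    generalize hF2 : (pvFindA fuel (pvFindA fuel p a).1 b).1 = pf at *
    have hraK : rep2.getD a a ∈ rep2.keys := (hrep2i a hamem2).1
    have hrbK : rep2.getD b b ∈ rep2.keys := (hrep2i b hbmem2).1
    have hra_id : rep2.getD (rep2.getD a a) (rep2.getD a a) = rep2.getD a a :=
      (hrep2i a hamem2).2
    have hrb_id : rep2.getD (rep2.getD b b) (rep2.getD b b) = rep2.getD b b :=
      (hrep2i b hbmem2).2
    have hraF : pf.getD (rep2.getD a a) (rep2.getD a a) = rep2.getD a a := by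
      have := hroot2 _ hraK
      rw [hra_id] at this
      exact pvRooted_fix this
    have hrbF : pf.getD (rep2.getD b b) (rep2.getD b b) = rep2.getD b b := by
      have := hroot2 _ hrbK
      rw [hrb_id] at this
      exact pvRooted_fix this
    have hrel : ∀ z, (pvRelabelB rep2 (rep2.getD a a) (rep2.getD b b)).getD z z =
        if z ∈ rep2.keys ∧ rep2.getD z z = rep2.getD b b then rep2.getD a a
        else rep2.getD z z :=
      fun z => pvRelabelB_getD _ _ rep2.keys rep2 hnd2 z
    have hrelk : (pvRelabelB rep2 (rep2.getD a a) (rep2.getD b b)).keys = rep2.keys :=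
      pvRelabelB_keys _ _ rep2.keys rep2 (fun y hy => hy)
    have hinsk : (pf.insert (rep2.getD b b) (rep2.getD a a)).keys = pf.keys :=
      PySem.Dict.keys_insert_of_contains _ _
        ((PySem.Dict.contains_iff_mem_keys _ _).mpr (hk2 ▸ hrbK))
    refine ⟨⟨?_, ?_, ?_, ?_⟩, ?_⟩
    · rw [hinsk, hk2, hrelk]
    · rw [hrelk]
      exact hnd2
    · intro z hz
      rw [hrelk] at hz
      obtain ⟨c, hc, hcnd, hcm⟩ := hroot2 z hz
      rw [hrel z]
      by_cases hs : rep2.getD z z = rep2.getD b b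
      · rw [if_pos ⟨hz, hs⟩]
        rw [hs] at hc
        obtain ⟨hch, hchnd⟩ := pvChain_insert_extend hrbF hraF hcond hc hcnd
        refine ⟨c ++ [rep2.getD a a], hch, hchnd, fun w hw => ?_⟩
        rw [hinsk]
        rcases List.mem_append.mp hw with hw' | hw'
        · exact hcm w hw'
        · rcases List.mem_singleton.mp hw' with rfl
          exact hk2 ▸ hraK
      · rw [if_neg (fun hcon => hs hcon.2)]
        exact ⟨c, pvChain_insert_other hrbF hs hc, hcnd,
          fun w hw => by rw [hinsk]; exact hcm w hw⟩
    · intro z hz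
      rw [hrelk] at hz
      rw [hrelk, hrel z]
      by_cases hs : rep2.getD z z = rep2.getD b b
      · rw [if_pos ⟨hz, hs⟩, hrel _]
        rw [if_neg (fun hcon => hcond (hra_id.symm.trans hcon.2))]
        exact ⟨hraK, hra_id⟩
      · rw [if_neg (fun hcon => hs hcon.2), hrel _]
        have hzid := (hrep2i z hz).2
        rw [if_neg (fun hcon : _ ∧ _ => hs (hzid.symm.trans hcon.2))]
        exact ⟨(hrep2i z hz).1, hzid⟩
    · rw [hrelk]
      omega

theorem pvInv_fold (fuel : Nat) (ls : List (String × String)) (p rep : PySem.Dict String String)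
    (hinv : pvInv p rep) (hfuel : rep.keys.length + 2 * ls.length < fuel) :
    pvInv (ls.foldl (fun p ab => pvUnionA fuel p ab.1 ab.2) p)
      (ls.foldl (fun rep ab => pvStepB rep ab.1 ab.2) rep) ∧
    (ls.foldl (fun rep ab => pvStepB rep ab.1 ab.2) rep).keys.length ≤
      rep.keys.length + 2 * ls.length := by
  induction ls generalizing p rep with
  | nil => exact ⟨hinv, by simp⟩
  | cons ab t ih =>
    simp only [List.length_cons] at hfuel
    obtain ⟨hinv', hlen'⟩ := pvInv_link fuel p rep ab.1 ab.2 hinv (by omega)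
    simp only [List.foldl_cons, List.length_cons]
    obtain ⟨hinvf, hlenf⟩ := ih (pvUnionA fuel p ab.1 ab.2) (pvStepB rep ab.1 ab.2)
      hinv' (by omega)
    exact ⟨hinvf, by omega⟩

-- A's final normalisation loop makes parent agree with rep on every processed key
theorem pvFinal_loop (fuel : Nat) (ks : List String) (p rep : PySem.Dict String String)
    (hinv : pvInv p rep) (hks : ∀ k ∈ ks, k ∈ rep.keys) (hfuel : rep.keys.length < fuel) :
    pvInv (ks.foldl (fun p k => let fr := pvFindA fuel p k; fr.1.insert k fr.2) p) rep ∧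
    ∀ k ∈ rep.keys, (k ∈ ks ∨ p.getD k k = rep.getD k k) →
      (ks.foldl (fun p k => let fr := pvFindA fuel p k; fr.1.insert k fr.2) p).getD k k =
        rep.getD k k := by
  induction ks generalizing p with
  | nil =>
    refine ⟨hinv, fun k hk h => ?_⟩
    rcases h with h | h
    · exact absurd h (List.not_mem_nil)
    · exact h
  | cons k0 t ih =>
    obtain ⟨hk, hnd, hroot, hrep⟩ := hinv
    have hk0 : k0 ∈ rep.keys := hks k0 List.mem_cons_self
    obtain ⟨c, hc, hcnd, hcm⟩ := hroot k0 hk0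
    have hclen : c.length ≤ fuel := by
      have h1 : c.length ≤ p.keys.length := pvLen_le hcnd (fun z hz => hcm z hz)
      rw [hk] at h1
      omega
    obtain ⟨hv, hcomp⟩ := pvFindA_spec fuel p k0 _ c hc hcnd hcm hclen
    have hinvf : pvInv (pvFindA fuel p k0).1 rep :=
      pvInv_compress hcomp ⟨hk, hnd, hroot, hrep⟩
    have hk0f : k0 ∈ (pvFindA fuel p k0).1.keys := hinvf.1 ▸ hk0
    have hcomp2 : pvCompress (pvFindA fuel p k0).1
        ((pvFindA fuel p k0).1.insert k0 (pvFindA fuel p k0).2) (rep.getD k0 k0) := by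
      refine ⟨PySem.Dict.keys_insert_of_contains _ _
        ((PySem.Dict.contains_iff_mem_keys _ _).mpr hk0f), fun y => ?_⟩
      by_cases hy : y = k0
      · subst hy
        rw [hv, PySem.Dict.getD_insert_self]
        exact Or.inr ⟨rfl, hinvf.2.2.1 y hk0⟩
      · rw [PySem.Dict.getD_insert_of_ne _ _ _ hy]
        exact Or.inl rfl
    have hinv1 : pvInv ((pvFindA fuel p k0).1.insert k0 (pvFindA fuel p k0).2) rep :=
      pvInv_compress hcomp2 hinvf
    simp only [List.foldl_cons]
    obtain ⟨hinvF, hvalF⟩ := ih ((pvFindA fuel p k0).1.insert k0 (pvFindA fuel p k0).2)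
      hinv1 (fun z hz => hks z (List.mem_cons_of_mem _ hz))
    refine ⟨hinvF, fun k hkm hcase => ?_⟩
    refine hvalF k hkm ?_
    rcases hcase with hcase | hcase
    · rcases List.mem_cons.mp hcase with rfl | hcase'
      · exact Or.inr (by rw [PySem.Dict.getD_insert_self]; exact hv)
      · exact Or.inl hcase'
    · right
      by_cases hkk0 : k = k0
      · subst hkk0
        rw [hv, PySem.Dict.getD_insert_self]
      · rw [PySem.Dict.getD_insert_of_ne _ _ _ hkk0]
        rcases hcomp.2 k with hsame | ⟨hval, hrt⟩
        · exact hsame.trans hcase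
        · rw [hval]
          exact pvRooted_det hrt (hroot k hkm)

theorem pvInv_empty : pvInv PySem.Dict.empty PySem.Dict.empty := by
  refine ⟨rfl, by simp [PySem.Dict.keys_empty], ?_, ?_⟩ <;>
    simp [PySem.Dict.keys_empty]

theorem pvItems_eq {d d' : PySem.Dict String String}
    (hk : d.keys = d'.keys) (hnd : d.keys.Nodup)
    (hv : ∀ k ∈ d.keys, d.getD k k = d'.getD k k) : d.items = d'.items := by
  rw [PySem.Dict.items_eq_map_keys d hnd "", PySem.Dict.items_eq_map_keys d' (hk ▸ hnd) "",
    ← hk]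
  refine List.map_congr_left (fun k hkm => ?_)
  obtain ⟨v, hvv⟩ : ∃ v, d.get? k = some v := by
    rcases hh : d.get? k with _ | v
    · exact absurd ((PySem.Dict.get?_eq_none_iff_not_mem_keys _ _).mp hh) (not_not.mpr hkm)
    · exact ⟨v, rfl⟩
  obtain ⟨w, hww⟩ : ∃ w, d'.get? k = some w := by
    rcases hh : d'.get? k with _ | w
    · exact absurd ((PySem.Dict.get?_eq_none_iff_not_mem_keys _ _).mp hh)
        (not_not.mpr (hk ▸ hkm))
    · exact ⟨w, rfl⟩
  have h1 := hv k hkm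
  rw [PySem.Dict.getD_eq_get?_getD, PySem.Dict.getD_eq_get?_getD, hvv, hww] at h1 ⊢
  simpa using h1

-- ===== VERDICT (by name: the statement is the Claim_ definition above) =====
theorem union_find_build_py_spec : Claim_equal_union_find_build_py := by
  unfold Claim_equal_union_find_build_py
  intro links _
  unfold Spec_union_find_build_py union_find_build_py union_find_build_py_alt
  show ((links.foldl (fun p ab => pvUnionA (2 * links.length + 1) p ab.1 ab.2)
        PySem.Dict.empty).keys.foldl
          (fun p k => let fr := pvFindA (2 * links.length + 1) p k; fr.1.insert k fr.2)
          (links.foldl (fun p ab => pvUnionA (2 * links.length + 1) p ab.1 ab.2)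
            PySem.Dict.empty)).items =
      (links.foldl (fun rep ab => pvStepB rep ab.1 ab.2) PySem.Dict.empty).items
  obtain ⟨hinv, hlen⟩ := pvInv_fold (2 * links.length + 1) links
    PySem.Dict.empty PySem.Dict.empty pvInv_empty
    (by simp only [PySem.Dict.keys_empty, List.length_nil]; omega)
  generalize hPF : links.foldl (fun p ab => pvUnionA (2 * links.length + 1) p ab.1 ab.2)
      PySem.Dict.empty = pF at hinv ⊢
  generalize hRF : links.foldl (fun rep ab => pvStepB rep ab.1 ab.2)
      PySem.Dict.empty = repF at hinv hlen ⊢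
  simp only [PySem.Dict.keys_empty, List.length_nil, Nat.zero_add] at hlen
  obtain ⟨hinv2, hval⟩ := pvFinal_loop (2 * links.length + 1) pF.keys pF repF
    hinv (fun k hk => hinv.1 ▸ hk) (by omega)
  refine pvItems_eq hinv2.1 (hinv2.1 ▸ hinv2.2.1) (fun k hk => ?_)
  refine hval k (hinv2.1 ▸ hk) (Or.inl ?_)
  rw [hinv.1]
  exact hinv2.1 ▸ hk
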